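-- pv_equiv track=rewrite | github.com/kelganor/AOC_2021 | solver_04.py | map_nums_to_boards
-- ===== SOURCE A (Python) =====
-- def map_nums_to_boards(boards):
--
--     num2boards = {}
--     for i, b in enumerate(boards):
--         for y, line in enumerate(b):
--             for x, el in enumerate(line):
--                 if el in num2boards:
--                     num2boards[el].append((i, y, x))
--                 else:
--                     num2boards[el] = [(i, y, x)]
--
--     return num2boards
-- ===== SOURCE B (Python) =====
-- def map_nums_to_boards(boards):
--     # Sort-then-group strategy: flatten the boards with their coordinates, stably
--     # sort the flat cells by value so equal values become adjacent runs (stability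
--     # keeps each run in board order), cut each run out in one scan, then order the
--     # groups by the index of their first occurrence (= dict insertion order).
--     cells = [(el, (i, y, x))
--              for i, b in enumerate(boards)
--              for y, line in enumerate(b)
--              for x, el in enumerate(line)]
--     srt = sorted(enumerate(cells), key=lambda t: t[1][0])
--     groups = []
--     n = len(srt)
--     t = 0
--     while t < n:
--         j, (el, _) = srt[t]
--         k = t + 1
--         while k < n and srt[k][1][0] == el:
--             k += 1
--         groups.append((j, el, [pos for _, (_, pos) in srt[t:k]]))
--         t = k
--     groups.sort(key=lambda g: g[0])
--     return {el: poss for _, el, poss in groups}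
-- ===== Notes on version B (the rewrite author's own statement) =====
-- stated objective: alternative
-- what changed: Replaces one-pass hash accumulation (per-cell dict membership test and append) by sort-then-group: flatten the cells, stably sort them by value, cut adjacent equal-value runs into groups in one scan, and sort the groups by first-occurrence index to restore dict insertion order.
import Mathlib
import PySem

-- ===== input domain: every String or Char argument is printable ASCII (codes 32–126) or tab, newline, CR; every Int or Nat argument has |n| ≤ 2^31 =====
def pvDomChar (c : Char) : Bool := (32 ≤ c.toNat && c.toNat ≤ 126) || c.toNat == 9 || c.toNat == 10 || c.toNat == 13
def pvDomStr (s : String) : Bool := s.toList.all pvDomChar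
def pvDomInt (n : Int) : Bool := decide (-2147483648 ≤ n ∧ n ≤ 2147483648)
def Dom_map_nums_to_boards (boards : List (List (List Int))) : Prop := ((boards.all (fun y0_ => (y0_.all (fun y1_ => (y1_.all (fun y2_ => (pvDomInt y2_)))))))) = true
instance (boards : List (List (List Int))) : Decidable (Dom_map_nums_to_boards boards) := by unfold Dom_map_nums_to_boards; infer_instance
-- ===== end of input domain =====

-- B replaces A's one-pass dict accumulation by flatten + stable sort by value + run
-- grouping + reordering the groups by first occurrence (alternative algorithm).


-- ===== PORT A =====
def map_nums_to_boards (boards : List (List (List Int))) : List (Int × List (Int × Int × Int)) :=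
  let num2boards : PySem.Dict Int (List (Int × Int × Int)) :=
    (PySem.List.enumerate boards).foldl (fun d p =>
      (PySem.List.enumerate p.2).foldl (fun d q =>
        (PySem.List.enumerate q.2).foldl (fun d r =>
          if d.contains r.2 then
            d.modify r.2 [] (fun v => v ++ [(p.1, q.1, r.1)])   -- num2boards[el].append((i,y,x))
          else
            d.insert r.2 [(p.1, q.1, r.1)]) d) d) PySem.Dict.empty
  num2boards.items

-- ===== PORT B =====
-- cells = [(el, (i, y, x)) for i, b in enumerate(boards) for y, line in enumerate(b) for x, el in enumerate(line)]
def pvCells (boards : List (List (List Int))) : List (Int × (Int × Int × Int)) :=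
  (PySem.List.enumerate boards).flatMap (fun p =>
    (PySem.List.enumerate p.2).flatMap (fun q =>
      (PySem.List.enumerate q.2).map (fun r => (r.2, (p.1, q.1, r.1)))))

-- the run-scanning while loop over the sorted list: emit one group per run of equal
-- values (the inner while = takeWhile), then continue past the run (= dropWhile)
def pvGroupRuns : List (Int × Int × Int × Int × Int) → List (Int × Int × List (Int × Int × Int))
  | [] => []
  | t :: rest =>
      (t.1, t.2.1, t.2.2 :: (rest.takeWhile (fun s => s.2.1 == t.2.1)).map (fun s => s.2.2)) ::
        pvGroupRuns (rest.dropWhile (fun s => s.2.1 == t.2.1))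
  termination_by L => L.length
  decreasing_by
    exact Nat.lt_succ_of_le (List.dropWhile_sublist _).length_le

def map_nums_to_boards_alt (boards : List (List (List Int))) : List (Int × List (Int × Int × Int)) :=
  let cells := pvCells boards
  -- srt = sorted(enumerate(cells), key=lambda t: t[1][0])   (stable)
  let srt := PySem.List.sorted (PySem.List.enumerate cells) (fun t => t.2.1)
  let groups := pvGroupRuns srt
  -- groups.sort(key=lambda g: g[0])
  let ordered := PySem.List.sorted groups (fun g => g.1)
  -- {el: poss for _, el, poss in groups}
  (ordered.foldl (fun (d : PySem.Dict Int (List (Int × Int × Int))) g =>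
      d.insert g.2.1 g.2.2) PySem.Dict.empty).items

-- ===== PRECONDITION & SPEC =====
def Spec_map_nums_to_boards (boards : List (List (List Int))) (out : List (Int × List (Int × Int × Int))) : Prop := out = map_nums_to_boards_alt boards
instance (boards : List (List (List Int))) (out : List (Int × List (Int × Int × Int))) : Decidable (Spec_map_nums_to_boards boards out) := by unfold Spec_map_nums_to_boards; infer_instance

-- ===== CLAIM (what is proved, stated in full; the proofs are below) =====
def Claim_equal_map_nums_to_boards : Prop := ∀ (boards : List (List (List Int))), Dom_map_nums_to_boards boards → Spec_map_nums_to_boards boards (map_nums_to_boards boards)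

-- ===== LEMMAS AND PROOFS =====

-- proof-only abbreviations: a cell's value, the index of a value's first occurrence,
-- and the group a value contributes to the result
def pvEl (t : Int × Int × Int × Int × Int) : Int := t.2.1
def pvFirst (L : List (Int × Int × Int × Int × Int)) (k : Int) : Int :=
  ((L.find? (fun t => t.2.1 == k)).map (fun t => t.1)).getD 0
def pvGroupOf (L : List (Int × Int × Int × Int × Int)) (k : Int) :
    Int × Int × List (Int × Int × Int) :=
  (pvFirst L k, k, (L.filter (fun t => t.2.1 == k)).map (fun t => t.2.2))

-- ---- A-side: the nested dict loop in canonical form ----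
theorem pv_stepA_eq_modify (d : PySem.Dict Int (List (Int × Int × Int)))
    (el : Int) (pos : Int × Int × Int) :
    (if d.contains el then d.modify el [] (fun v => v ++ [pos]) else d.insert el [pos])
      = d.modify el [] (fun v => v ++ [pos]) := by
  by_cases h : d.contains el = true
  · simp [h]
  · simp only [Bool.not_eq_true] at h
    simp [h, PySem.Dict.modify, PySem.Dict.getD_of_not_contains d _ h]

theorem pv_A_dict_eq (boards : List (List (List Int))) :
    (PySem.List.enumerate boards).foldl (fun d p =>
      (PySem.List.enumerate p.2).foldl (fun d q =>
        (PySem.List.enumerate q.2).foldl (fun d r =>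
          if d.contains r.2 then
            d.modify r.2 [] (fun v => v ++ [(p.1, q.1, r.1)])
          else
            d.insert r.2 [(p.1, q.1, r.1)]) d) d) PySem.Dict.empty
      = (pvCells boards).foldl
          (fun d p => d.modify p.1 [] (fun v => v ++ [p.2])) PySem.Dict.empty := by
  simp only [pvCells, List.foldl_flatMap, List.foldl_map, pv_stepA_eq_modify]

theorem pv_A_canon (boards : List (List (List Int))) :
    map_nums_to_boards boards
      = (PySem.Set.ofList ((pvCells boards).map (fun p => p.1))).map
          (fun k => (k, ((pvCells boards).filter (fun p => p.1 == k)).map (fun p => p.2))) := by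
  simp only [map_nums_to_boards]
  rw [pv_A_dict_eq]
  set l := pvCells boards with hl
  have hnd : ((l.foldl (fun d p => d.modify p.1 [] (fun v => v ++ [p.2]))
      (PySem.Dict.empty : PySem.Dict Int (List (Int × Int × Int)))).keys).Nodup :=
    PySem.Dict.nodup_keys_foldl_modify_key l (fun p => p.1) [] (fun _ p => fun v => v ++ [p.2]) _
      (by simp [PySem.Dict.keys_empty])
  rw [PySem.Dict.items_eq_map_keys _ hnd []]
  have hkeys : (l.foldl (fun d p => d.modify p.1 [] (fun v => v ++ [p.2]))
      (PySem.Dict.empty : PySem.Dict Int (List (Int × Int × Int)))).keys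
      = PySem.Set.ofList (l.map (fun p => p.1)) := by
    rw [PySem.Dict.keys_foldl_modify_key l (fun p => p.1) [] (fun _ p => fun v => v ++ [p.2])]
    simp [PySem.Dict.keys_empty, PySem.Set.update_nil_left]
  rw [hkeys]
  refine List.map_congr_left (fun k _ => ?_)
  rw [PySem.Dict.getD_foldl_modify_append, PySem.Dict.getD_empty]
  simp

-- ---- insertion-sort stability ----
theorem pv_insertBy_cons {α : Type} (b : α → α → Bool) (x y : α) (ys : List α) :
    PySem.List.insertBy b x (y :: ys)
      = if b x y then x :: y :: ys else y :: PySem.List.insertBy b x ys := rfl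

theorem pv_mem_insertBy {α : Type} (b : α → α → Bool) (x z : α) (ys : List α)
    (h : z ∈ PySem.List.insertBy b x ys) : z = x ∨ z ∈ ys := by
  induction ys with
  | nil => simp [PySem.List.insertBy] at h; exact Or.inl h
  | cons y ys ih =>
      rw [pv_insertBy_cons] at h
      split_ifs at h with hb
      · rcases List.mem_cons.mp h with h | h
        · exact Or.inl h
        · exact Or.inr h
      · rcases List.mem_cons.mp h with h | h
        · exact Or.inr (List.mem_cons.mpr (Or.inl h))
        · rcases ih h with h | h
          · exact Or.inl h
          · exact Or.inr (List.mem_cons.mpr (Or.inr h))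

theorem pv_insertBy_pairwise {α : Type} (key : α → Int) (x : α) (acc : List α)
    (h : acc.Pairwise (fun a b => key a ≤ key b)) :
    (PySem.List.insertBy (fun a b => decide (key a < key b)) x acc).Pairwise
      (fun a b => key a ≤ key b) := by
  induction acc with
  | nil => simp [PySem.List.insertBy]
  | cons y ys ih =>
      rw [pv_insertBy_cons]
      rcases List.pairwise_cons.mp h with ⟨hy, hys⟩
      by_cases hxy : key x < key y
      · rw [if_pos (by simpa using hxy)]
        refine List.pairwise_cons.mpr ⟨?_, h⟩
        intro z hz
        rcases List.mem_cons.mp hz with rfl | hz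
        · omega
        · have := hy z hz; omega
      · rw [if_neg (by simpa using hxy)]
        refine List.pairwise_cons.mpr ⟨?_, ih hys⟩
        intro z hz
        rcases pv_mem_insertBy _ _ _ _ hz with rfl | hz
        · omega
        · exact hy z hz

theorem pv_insertBy_filter {α : Type} (key : α → Int) (x : α) (acc : List α) (c : Int)
    (h : acc.Pairwise (fun a b => key a ≤ key b)) :
    (PySem.List.insertBy (fun a b => decide (key a < key b)) x acc).filter
        (fun y => key y == c)
      = if key x = c then acc.filter (fun y => key y == c) ++ [x]
        else acc.filter (fun y => key y == c) := by
  induction acc with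
  | nil =>
      simp only [PySem.List.insertBy]
      by_cases hc : key x = c <;> simp [hc]
  | cons y ys ih =>
      rw [pv_insertBy_cons]
      rcases List.pairwise_cons.mp h with ⟨hy, hys⟩
      by_cases hxy : key x < key y
      · rw [if_pos (by simpa using hxy)]
        have hge : ∀ z ∈ y :: ys, key y ≤ key z := by
          intro z hz
          rcases List.mem_cons.mp hz with rfl | hz
          · exact le_rfl
          · exact hy z hz
        by_cases hc : key x = c
        · have hnil : (y :: ys).filter (fun z => key z == c) = [] := by
            refine List.filter_eq_nil_iff.mpr (fun z hz => ?_)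
            have := hge z hz
            simp only [beq_iff_eq]
            omega
          simp [List.filter_cons, hc, hnil]
        · have hxc : (key x == c) = false := by simp [hc]
          simp [List.filter_cons, hxc, hc]
      · rw [if_neg (by simpa using hxy)]
        rw [List.filter_cons, List.filter_cons]
        by_cases hyc : (key y == c) = true <;>
          by_cases hc : key x = c <;>
            simp [hyc, hc, ih hys]

-- stability: filtering one value class out of the sorted list gives the original order
theorem pv_sorted_filter {α : Type} (xs : List α) (key : α → Int) (c : Int) :
    (PySem.List.sorted xs key).filter (fun y => key y == c)
      = xs.filter (fun y => key y == c) := by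
  have aux : ∀ (l : List α) (acc : List α), acc.Pairwise (fun a b => key a ≤ key b) →
      (l.foldl (fun acc x => PySem.List.insertBy (fun a b => decide (key a < key b)) x acc)
          acc).filter (fun y => key y == c)
        = acc.filter (fun y => key y == c) ++ l.filter (fun y => key y == c) := by
    intro l
    induction l with
    | nil => intro acc _; simp
    | cons x l ih =>
        intro acc hacc
        rw [List.foldl_cons, ih _ (pv_insertBy_pairwise key x acc hacc),
            pv_insertBy_filter key x acc c hacc, List.filter_cons]
        by_cases hc : key x = c
        · simp [hc]
        · have hxc : (key x == c) = false := by simp [hc]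
          simp [hc, hxc]
  rw [PySem.List.sorted_eq_foldl_insertBy, aux xs [] (by simp)]
  simp

theorem pv_find?_eq_head?_filter {α : Type} (p : α → Bool) (l : List α) :
    l.find? p = (l.filter p).head? := by
  exact List.head?_filter.symm

-- ---- ordered dedup (PySem.Set.ofList) structure ----
theorem pv_foldl_add_cons {α : Type} [BEq α] [LawfulBEq α] (xs : List α) (acc : List α) (x : α) :
    xs.foldl PySem.Set.add (x :: acc)
      = x :: (xs.filter (fun y => !(y == x))).foldl PySem.Set.add acc := by
  induction xs generalizing acc with
  | nil => rfl
  | cons y ys ih =>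
      by_cases hxy : y = x
      · subst hxy
        have h1 : PySem.Set.add (y :: acc) y = y :: acc := by
          simp [PySem.Set.add, PySem.Set.contains]
        simp [List.foldl_cons, List.filter_cons, h1, ih]
      · have h1 : PySem.Set.add (x :: acc) y = x :: PySem.Set.add acc y := by
          by_cases hmem : y ∈ acc <;>
            simp [PySem.Set.add, PySem.Set.contains, hxy, hmem]
        have h2 : (y == x) = false := by simp [hxy]
        simp [List.foldl_cons, List.filter_cons, h2, h1, ih]

theorem pv_ofList_cons {α : Type} [BEq α] [LawfulBEq α] (x : α) (xs : List α) :
    PySem.Set.ofList (x :: xs) = x :: PySem.Set.ofList (xs.filter (fun y => !(y == x))) := by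
  rw [PySem.Set.ofList_eq_foldl, PySem.Set.ofList_eq_foldl, List.foldl_cons]
  have h : PySem.Set.add [] x = [x] := rfl
  rw [h, pv_foldl_add_cons]

theorem pv_ofList_eq_self {α : Type} [BEq α] [LawfulBEq α] (xs : List α) (h : xs.Nodup) :
    PySem.Set.ofList xs = xs := by
  induction xs with
  | nil => rfl
  | cons x l ih =>
      rw [pv_ofList_cons]
      have hnx : x ∉ l := (List.nodup_cons.mp h).1
      have hx : l.filter (fun y => !(y == x)) = l :=
        List.filter_eq_self.mpr (fun a ha => by
          have : a ≠ x := fun hax => hnx (hax ▸ ha)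
          simp [this])
      rw [hx, ih (List.nodup_cons.mp h).2]

-- find? over a filter that only removes elements failing p
theorem pv_find?_filter_inv {α : Type} (p q : α → Bool) (l : List α)
    (h : ∀ x ∈ l, p x = true → q x = true) :
    (l.filter q).find? p = l.find? p := by
  induction l with
  | nil => rfl
  | cons a l ih =>
      rw [List.filter_cons]
      by_cases hq : q a = true
      · simp only [hq, if_pos]
        rw [List.find?_cons, List.find?_cons]
        split <;> [rfl; exact ih (fun x hx => h x (List.mem_cons.mpr (Or.inr hx)))]
      · have hpa : p a = false := by
          by_contra hp
          exact hq (h a (List.mem_cons.mpr (Or.inl rfl)) (by revert hp; cases p a <;> simp))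
        simp only [hq, if_neg]
        rw [List.find?_cons, hpa]
        simp only [Bool.false_eq_true, if_neg (by simp : ¬False)]
        exact ih (fun x hx => h x (List.mem_cons.mpr (Or.inr hx)))

-- ---- the grouping loop on a value-sorted list ----
-- every element past the first run is strictly larger
theorem pv_drop_gt (t : Int × Int × Int × Int × Int) (rest : List (Int × Int × Int × Int × Int))
    (h : (t :: rest).Pairwise (fun a b => a.2.1 ≤ b.2.1)) :
    ∀ s ∈ rest.dropWhile (fun s => s.2.1 == t.2.1), t.2.1 < s.2.1 := by
  rcases List.pairwise_cons.mp h with ⟨hy, hrest⟩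
  intro s hs
  cases hd : rest.dropWhile (fun s => s.2.1 == t.2.1) with
  | nil => rw [hd] at hs; simp at hs
  | cons d ds =>
      rw [hd] at hs
      have hdm : d ∈ rest := (List.dropWhile_sublist _).mem (hd ▸ List.mem_cons_self)
      have hdne : (d.2.1 == t.2.1) = false := by
        have := List.head?_dropWhile_not (fun s => s.2.1 == t.2.1) rest
        rw [hd] at this
        simpa using this
      have hdgt : t.2.1 < d.2.1 := by
        have h1 := hy d hdm
        have h2 : d.2.1 ≠ t.2.1 := by simpa using hdne
        omega
      rcases List.mem_cons.mp hs with rfl | hs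
      · exact hdgt
      · have hpw : (d :: ds).Pairwise (fun a b => a.2.1 ≤ b.2.1) :=
          hd ▸ hrest.sublist (List.dropWhile_sublist _)
        have := (List.pairwise_cons.mp hpw).1 s hs
        omega

theorem pv_groupRuns_eq (L : List (Int × Int × Int × Int × Int))
    (h : L.Pairwise (fun a b => a.2.1 ≤ b.2.1)) :
    pvGroupRuns L = (PySem.Set.ofList (L.map pvEl)).map (pvGroupOf L) := by
  induction L using pvGroupRuns.induct with
  | case1 => simp [pvGroupRuns]
  | case2 t rest ih =>
      set run := rest.takeWhile (fun s => s.2.1 == t.2.1) with hrun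
      set drop := rest.dropWhile (fun s => s.2.1 == t.2.1) with hdrop
      have hsplit : run ++ drop = rest := List.takeWhile_append_dropWhile
      have hgt : ∀ s ∈ drop, t.2.1 < s.2.1 := pv_drop_gt t rest h
      have hrunel : ∀ s ∈ run, (s.2.1 == t.2.1) = true := by
        rw [hrun]
        exact fun s hs => List.mem_takeWhile_imp (p := fun s : Int×Int×Int×Int×Int => s.2.1 == t.2.1) hs
      -- the dedup of the keys
      have hofl : PySem.Set.ofList ((t :: rest).map pvEl)
          = t.2.1 :: PySem.Set.ofList (drop.map pvEl) := by
        rw [List.map_cons, pv_ofList_cons]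
        simp only [pvEl]
        congr 1
        have : (rest.map pvEl).filter (fun y => !(y == t.2.1))
            = (rest.filter (fun s => !(s.2.1 == t.2.1))).map pvEl := by
          rw [List.filter_map]; rfl
        rw [this]
        congr 1
        rw [← hsplit, List.filter_append]
        have h1 : run.filter (fun s => !(s.2.1 == t.2.1)) = [] :=
          List.filter_eq_nil_iff.mpr (fun s hs => by simp [hrunel s hs])
        have h2 : drop.filter (fun s => !(s.2.1 == t.2.1)) = drop :=
          List.filter_eq_self.mpr (fun s hs => by
            have := hgt s hs; simp; omega)
        rw [h1, h2, List.nil_append]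
      -- head group
      have hhead : pvGroupOf (t :: rest) t.2.1
          = (t.1, t.2.1, t.2.2 :: run.map (fun s => s.2.2)) := by
        unfold pvGroupOf pvFirst
        have hf : (t :: rest).find? (fun s => s.2.1 == t.2.1) = some t := by
          rw [List.find?_cons]; simp
        rw [hf]
        have hfil : (t :: rest).filter (fun s => s.2.1 == t.2.1) = t :: run := by
          rw [List.filter_cons]
          simp only [beq_self_eq_true, if_pos]
          congr 1
          rw [← hsplit, List.filter_append]
          have h1 : run.filter (fun s => s.2.1 == t.2.1) = run :=
            List.filter_eq_self.mpr hrunel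
          have h2 : drop.filter (fun s => s.2.1 == t.2.1) = [] :=
            List.filter_eq_nil_iff.mpr (fun s hs => by
              have := hgt s hs; simp; omega)
          rw [h1, h2, List.append_nil]
        rw [hfil]
        simp
      -- groups of later keys don't see the head run
      have htail : ∀ k ∈ PySem.Set.ofList (drop.map pvEl),
          pvGroupOf drop k = pvGroupOf (t :: rest) k := by
        intro k hk
        have hkm : k ∈ drop.map pvEl := (PySem.Set.mem_ofList _ _).mp hk
        rcases List.mem_map.mp hkm with ⟨s, hs, rfl⟩
        have hkgt : t.2.1 < s.2.1 := hgt s hs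
        have hne : ∀ u ∈ t :: run, (u.2.1 == pvEl s) = false := by
          intro u hu
          rcases List.mem_cons.mp hu with rfl | hu
          · simp [pvEl]; omega
          · have : u.2.1 = t.2.1 := by simpa using hrunel u hu
            simp [pvEl, this]; omega
        have hL : t :: rest = (t :: run) ++ drop := by
          rw [← hsplit]; rfl
        unfold pvGroupOf pvFirst
        rw [hL, List.find?_append, List.filter_append]
        have hf : (t :: run).find? (fun u => u.2.1 == pvEl s) = none :=
          List.find?_eq_none.mpr (fun u hu => by simp [hne u hu])
        have hfil : (t :: run).filter (fun u => u.2.1 == pvEl s) = [] :=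
          List.filter_eq_nil_iff.mpr (fun u hu => by simp [hne u hu])
        rw [hf, hfil, Option.none_or, List.nil_append]
      -- assemble
      rw [pvGroupRuns]
      have hdpw : drop.Pairwise (fun a b => a.2.1 ≤ b.2.1) :=
        ((List.pairwise_cons.mp h).2).sublist (List.dropWhile_sublist _)
      rw [ih hdpw, hofl, List.map_cons, hhead]
      congr 1
      exact List.map_congr_left htail

-- ---- first-occurrence indices strictly increase along the dedup order ----
theorem pv_dedup_first_pairwise (L : List (Int × Int × Int × Int × Int))
    (h : L.Pairwise (fun a b => a.1 < b.1)) :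
    (PySem.Set.ofList (L.map pvEl)).Pairwise (fun a b => pvFirst L a < pvFirst L b) := by
  suffices H : ∀ n (L : List (Int × Int × Int × Int × Int)), L.length ≤ n →
      L.Pairwise (fun a b => a.1 < b.1) →
      (PySem.Set.ofList (L.map pvEl)).Pairwise (fun a b => pvFirst L a < pvFirst L b) from
    H L.length L le_rfl h
  intro n
  induction n with
  | zero =>
      intro L hlen _
      have : L = [] := List.length_eq_zero_iff.mp (Nat.le_zero.mp hlen)
      subst this
      simp [PySem.Set.ofList]
  | succ n ihn =>
      intro L hlen hpw
      cases L with
      | nil => simp [PySem.Set.ofList]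
      | cons t rest =>
          rcases List.pairwise_cons.mp hpw with ⟨hy, hrest⟩
          rw [List.map_cons, pv_ofList_cons]
          simp only [pvEl]
          have hmapfil : (rest.map pvEl).filter (fun y => !(y == t.2.1))
              = (rest.filter (fun s => !(s.2.1 == t.2.1))).map pvEl := by
            rw [List.filter_map]; rfl
          set L' := rest.filter (fun s => !(s.2.1 == t.2.1)) with hL'
          rw [hmapfil]
          -- find? over the whole list agrees with find? over L' for keys ≠ t.2.1
          have hfind : ∀ k, k ≠ t.2.1 →
              (t :: rest).find? (fun u => u.2.1 == k) = L'.find? (fun u => u.2.1 == k) := by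
            intro k hk
            rw [List.find?_cons]
            have ht : (t.2.1 == k) = false := by
              simp only [beq_eq_false_iff_ne, ne_eq]
              omega
            rw [ht]
            simp only [Bool.false_eq_true, if_neg (by simp : ¬False)]
            rw [hL', pv_find?_filter_inv]
            intro u _ hu
            have : u.2.1 = k := by simpa using hu
            simp only [beq_eq_false_iff_ne, ne_eq, Bool.not_eq_true']
            simp [this]
            omega
          have hk_ne : ∀ k ∈ PySem.Set.ofList (L'.map pvEl), k ≠ t.2.1 := by
            intro k hk
            rcases List.mem_map.mp ((PySem.Set.mem_ofList _ _).mp hk) with ⟨s, hs, rfl⟩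
            have := (List.mem_filter.mp hs).2
            simp only [pvEl]
            simpa using this
          have hsome : ∀ k ∈ PySem.Set.ofList (L'.map pvEl),
              ∃ s₀, L'.find? (fun u => u.2.1 == k) = some s₀ ∧ s₀ ∈ rest := by
            intro k hk
            rcases List.mem_map.mp ((PySem.Set.mem_ofList _ _).mp hk) with ⟨s, hs, rfl⟩
            have hex : ∃ x ∈ L', (fun u => u.2.1 == pvEl s) x = true :=
              ⟨s, hs, by simp [pvEl]⟩
            rcases Option.isSome_iff_exists.mp (List.find?_isSome.mpr hex) with ⟨s₀, hs₀⟩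
            exact ⟨s₀, hs₀, List.filter_sublist.mem (List.mem_of_find?_eq_some hs₀)⟩
          refine List.pairwise_cons.mpr ⟨?_, ?_⟩
          · intro k hk
            have hne := hk_ne k hk
            rcases hsome k hk with ⟨s₀, hf, hmem⟩
            have h1 : pvFirst (t :: rest) t.2.1 = t.1 := by
              unfold pvFirst
              rw [List.find?_cons]
              simp
            have h2 : pvFirst (t :: rest) k = s₀.1 := by
              unfold pvFirst
              rw [hfind k hne, hf]
              rfl
            rw [h1, h2]
            exact hy s₀ hmem
          · have hL'pw : L'.Pairwise (fun a b => a.1 < b.1) :=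
              hrest.sublist List.filter_sublist
            have hlen' : L'.length ≤ n := by
              have h1 : L'.length ≤ rest.length := List.filter_sublist.length_le
              have h2 : rest.length ≤ n := by simpa using Nat.le_of_succ_le_succ hlen
              omega
            have := ihn L' hlen' hL'pw
            refine this.imp_of_mem ?_
            intro a b ha hb hab
            have hfa : pvFirst (t :: rest) a = pvFirst L' a := by
              unfold pvFirst; rw [hfind a (hk_ne a ha)]
            have hfb : pvFirst (t :: rest) b = pvFirst L' b := by
              unfold pvFirst; rw [hfind b (hk_ne b hb)]
            rw [hfa, hfb]
            exact hab

-- ---- enumerate bridges ----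
theorem pv_enumerate_map_snd {α : Type} (xs : List α) (s : Int) :
    (PySem.List.enumerate xs s).map (fun t => t.2) = xs := by
  induction xs generalizing s with
  | nil => rfl
  | cons a l ih => simp [PySem.List.enumerate, ih]

theorem pv_enumerate_idx_ge {α : Type} (xs : List α) (s : Int) :
    ∀ t ∈ PySem.List.enumerate xs s, s ≤ t.1 := by
  induction xs generalizing s with
  | nil => intro t ht; simp [PySem.List.enumerate] at ht
  | cons a l ih =>
      intro t ht
      simp only [PySem.List.enumerate, List.mem_cons] at ht
      rcases ht with h | h
      · simp [h]
      · have := ih (s + 1) t h; omega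

theorem pv_enumerate_idx_lt {α : Type} (xs : List α) (s : Int) :
    (PySem.List.enumerate xs s).Pairwise (fun a b => a.1 < b.1) := by
  induction xs generalizing s with
  | nil => simp [PySem.List.enumerate]
  | cons a l ih =>
      simp only [PySem.List.enumerate, List.pairwise_cons]
      exact ⟨fun t ht => by have := pv_enumerate_idx_ge l (s + 1) t ht; omega, ih (s + 1)⟩

theorem pv_enumerate_filter_map (cells : List (Int × (Int × Int × Int))) (s : Int) (k : Int) :
    ((PySem.List.enumerate cells s).filter (fun t => t.2.1 == k)).map (fun t => t.2.2)
      = (cells.filter (fun p => p.1 == k)).map (fun p => p.2) := by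
  induction cells generalizing s with
  | nil => rfl
  | cons a l ih =>
      by_cases h : a.1 == k <;>
        simp [PySem.List.enumerate, List.filter, h, ih]

-- ---- the dict comprehension over distinct keys is just a map ----
theorem pv_getD_foldl_insert_of_not_mem (gs : List (Int × Int × List (Int × Int × Int)))
    (d : PySem.Dict Int (List (Int × Int × Int))) (k : Int)
    (h : k ∉ gs.map (fun g => g.2.1)) :
    (gs.foldl (fun (d : PySem.Dict Int (List (Int × Int × Int))) g =>
        d.insert g.2.1 g.2.2) d).getD k [] = d.getD k [] := by
  induction gs generalizing d with
  | nil => rfl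
  | cons g gs ih =>
      rw [List.foldl_cons]
      have hk : k ≠ g.2.1 := fun he => h (by simp [he])
      rw [ih _ (fun hm => h (by simp [List.mem_cons]; right; simpa using hm))]
      rw [PySem.Dict.getD_insert]
      simp [hk]

theorem pv_getD_foldl_insert_self (gs : List (Int × Int × List (Int × Int × Int)))
    (d : PySem.Dict Int (List (Int × Int × Int)))
    (h : (gs.map (fun g => g.2.1)).Nodup) :
    ∀ g ∈ gs, (gs.foldl (fun (d : PySem.Dict Int (List (Int × Int × Int))) g' =>
        d.insert g'.2.1 g'.2.2) d).getD g.2.1 [] = g.2.2 := by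
  induction gs generalizing d with
  | nil => intro g hg; simp at hg
  | cons g0 gs ih =>
      intro g hg
      rw [List.foldl_cons]
      rcases List.mem_cons.mp hg with rfl | hg
      · have hnm : g.2.1 ∉ gs.map (fun g' => g'.2.1) := by
          rw [List.map_cons] at h
          exact (List.nodup_cons.mp h).1
        rw [pv_getD_foldl_insert_of_not_mem _ _ _ hnm, PySem.Dict.getD_insert]
        simp
      · exact ih _ ((List.nodup_cons.mp (by rwa [List.map_cons] at h)).2) g hg

theorem pv_items_foldl_insert (gs : List (Int × Int × List (Int × Int × Int)))
    (h : (gs.map (fun g => g.2.1)).Nodup) :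
    (gs.foldl (fun (d : PySem.Dict Int (List (Int × Int × Int))) g =>
        d.insert g.2.1 g.2.2) PySem.Dict.empty).items
      = gs.map (fun g => (g.2.1, g.2.2)) := by
  have hkeys : (gs.foldl (fun (d : PySem.Dict Int (List (Int × Int × Int))) g =>
      d.insert g.2.1 g.2.2) PySem.Dict.empty).keys = gs.map (fun g => g.2.1) := by
    rw [PySem.Dict.keys_foldl_insert_key gs (fun g => g.2.1) (fun d g => g.2.2)]
    rw [PySem.Dict.keys_empty, PySem.Set.update_nil_left]
    exact pv_ofList_eq_self _ h
  rw [PySem.Dict.items_eq_map_keys _ (hkeys ▸ h) [], hkeys, List.map_map]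
  refine List.map_congr_left (fun g hg => ?_)
  simp only [Function.comp]
  rw [pv_getD_foldl_insert_self gs _ h g hg]

-- ---- B in canonical form ----
theorem pv_B_canon (boards : List (List (List Int))) :
    map_nums_to_boards_alt boards
      = (PySem.Set.ofList ((pvCells boards).map (fun p => p.1))).map
          (fun k => (k, ((pvCells boards).filter (fun p => p.1 == k)).map (fun p => p.2))) := by
  simp only [map_nums_to_boards_alt]
  set cells := pvCells boards with hcells
  set ix := PySem.List.enumerate cells with hix
  set srt := PySem.List.sorted ix (fun t => t.2.1) with hsrt
  -- the sorted list is value-sorted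
  have hpw : srt.Pairwise (fun a b => a.2.1 ≤ b.2.1) :=
    PySem.List.sorted_pairwise ix (fun t => t.2.1)
  -- groups over srt are groups over ix (stability)
  have hGO : pvGroupOf srt = pvGroupOf ix := by
    funext k
    unfold pvGroupOf pvFirst
    have hfil : srt.filter (fun t => t.2.1 == k) = ix.filter (fun t => t.2.1 == k) :=
      pv_sorted_filter ix (fun t => t.2.1) k
    rw [pv_find?_eq_head?_filter, pv_find?_eq_head?_filter, hfil]
  have hgroups : pvGroupRuns srt = (PySem.Set.ofList (srt.map pvEl)).map (pvGroupOf ix) := by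
    rw [pv_groupRuns_eq srt hpw, hGO]
  -- the two key sets are permutations of each other
  have hperm : ((PySem.Set.ofList (ix.map pvEl)).map (pvGroupOf ix)).Perm (pvGroupRuns srt) := by
    rw [hgroups]
    refine List.Perm.map _ ?_
    refine (List.perm_ext_iff_of_nodup (PySem.Set.nodup_ofList _) (PySem.Set.nodup_ofList _)).mpr ?_
    intro a
    rw [PySem.Set.mem_ofList, PySem.Set.mem_ofList]
    exact ((PySem.List.sorted_perm ix (fun t => t.2.1) false).map pvEl).mem_iff.symm
  -- first-occurrence indices strictly increase along the dedup order
  have hlt : ((PySem.Set.ofList (ix.map pvEl)).map (pvGroupOf ix)).Pairwise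
      (fun a b => a.1 < b.1) := by
    rw [List.pairwise_map]
    exact pv_dedup_first_pairwise ix (pv_enumerate_idx_lt cells 0)
  rw [PySem.List.sorted_eq_of_perm_of_pairwise_lt (pvGroupRuns srt)
        ((PySem.Set.ofList (ix.map pvEl)).map (pvGroupOf ix)) (fun g => g.1) hperm hlt]
  -- the dict comprehension over distinct keys is the map itself
  have hnd : (((PySem.Set.ofList (ix.map pvEl)).map (pvGroupOf ix)).map
      (fun g => g.2.1)).Nodup := by
    rw [List.map_map]
    have : ((fun g : Int × Int × List (Int × Int × Int) => g.2.1) ∘ pvGroupOf ix)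
        = fun k => k := rfl
    rw [this]
    simpa using PySem.Set.nodup_ofList (ix.map pvEl)
  rw [pv_items_foldl_insert _ hnd, List.map_map]
  -- bridge enumerate back to the raw cells
  have hkeys : ix.map pvEl = cells.map (fun p => p.1) := by
    have h1 : ix.map pvEl = (ix.map (fun t => t.2)).map (fun p => p.1) := by
      rw [List.map_map]; rfl
    rw [h1, pv_enumerate_map_snd]
  rw [hkeys]
  refine List.map_congr_left (fun k _ => ?_)
  simp only [Function.comp, pvGroupOf]
  rw [pv_enumerate_filter_map cells 0 k]

-- ===== VERDICT (by name: the statement is the Claim_ definition above) =====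
theorem map_nums_to_boards_spec : Claim_equal_map_nums_to_boards := by
  intro boards _
  unfold Spec_map_nums_to_boards
  rw [pv_A_canon, pv_B_canon]
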